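-- pv_equiv track=rewrite | github.com/gozdetanyildizz/py-code-quality-refactor | data/examples/sample.py | badFunctionName
-- ===== SOURCE A (Python) =====
-- def badFunctionName(x,y,z):
--     total=0
--     for i in range(0,10):
--         if i%2==0:
--             total+=i
--         else:
--             total-=i
--     return total+x+y+z
-- ===== SOURCE B (Python) =====
-- def badFunctionName(x, y, z):
--     # alternating sum 0-1+2-3+...+8-9 is the constant -5
--     return -5 + x + y + z
-- ===== Notes on version B (the rewrite author's own statement) =====
-- stated objective: simpler
-- what changed: Replaced the fixed 10-iteration alternating-sum loop with the constant -5 it always computes, returning the closed-form expression -5 + x + y + z.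
import Mathlib
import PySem

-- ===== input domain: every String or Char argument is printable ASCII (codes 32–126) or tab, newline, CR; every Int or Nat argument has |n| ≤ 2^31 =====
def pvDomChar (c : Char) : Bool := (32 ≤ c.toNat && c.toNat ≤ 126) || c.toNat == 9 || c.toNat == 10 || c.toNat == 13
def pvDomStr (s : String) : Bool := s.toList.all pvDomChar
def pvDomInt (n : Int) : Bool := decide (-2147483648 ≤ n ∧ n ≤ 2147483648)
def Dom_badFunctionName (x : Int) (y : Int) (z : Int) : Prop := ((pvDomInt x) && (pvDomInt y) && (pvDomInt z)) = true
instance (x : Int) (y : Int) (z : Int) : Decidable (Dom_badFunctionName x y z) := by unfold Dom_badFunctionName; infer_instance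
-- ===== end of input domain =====

-- B replaces the fixed alternating-sum loop by its constant value -5 (simpler).


-- ===== PORT A =====
-- Loop 'for i in range(0,10)' as a fold over PySem.List.pyRange with the same accumulator.
def badFunctionName (x : Int) (y : Int) (z : Int) : Int :=
  let total := (PySem.List.pyRange 0 10 1).foldl
    (fun total i => if i % 2 == 0 then total + i else total - i) 0
  total + x + y + z

-- ===== PORT B =====
-- B: closed form; the alternating sum of 0..9 is -5.
def badFunctionName_alt (x : Int) (y : Int) (z : Int) : Int := -5 + x + y + z

-- ===== PRECONDITION & SPEC =====
def Spec_badFunctionName (x : Int) (y : Int) (z : Int) (out : Int) : Prop := out = badFunctionName_alt x y z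
instance (x : Int) (y : Int) (z : Int) (out : Int) : Decidable (Spec_badFunctionName x y z out) := by unfold Spec_badFunctionName; infer_instance

-- ===== CLAIM (what is proved, stated in full; the proofs are below) =====
def Claim_equal_badFunctionName : Prop := ∀ (x : Int) (y : Int) (z : Int), Dom_badFunctionName x y z → Spec_badFunctionName x y z (badFunctionName x y z)

-- ===== LEMMAS AND PROOFS =====

-- ===== VERDICT (by name: the statement is the Claim_ definition above) =====
theorem badFunctionName_spec : Claim_equal_badFunctionName := by
  intro x y z _
  unfold Spec_badFunctionName badFunctionName badFunctionName_alt
  have h : (PySem.List.pyRange 0 10 1).foldl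
      (fun total i => if i % 2 == 0 then total + i else total - i) 0 = -5 := by decide
  simp only [h]
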